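-- pv_equiv track=rewrite | github.com/casebor/OGLtests | cartoon_b.py | get_secstruct_indexes
-- ===== SOURCE A (Python) =====
-- def get_secstruct_indexes(ss_seq):
--     secstruct = []
--     active_ss = ss_seq[0]
--     active_i = 0
--     ss_codes = {"C":0, "H":1, "S": 2}
--     i = 1
--     while i < len(ss_seq):
--         if ss_seq[i] != active_ss:
--             secstruct.append((ss_codes[active_ss], active_i, i))
--             active_ss = ss_seq[i]
--             active_i = i
--         i += 1
--     secstruct.append((ss_codes[active_ss], active_i, i))
--     return secstruct
-- ===== SOURCE B (Python) =====
-- def get_secstruct_indexes(ss_seq):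
--     ss_codes = {"C": 0, "H": 1, "S": 2}
--     n = len(ss_seq)
--     cuts = [0] + [i for i in range(1, n) if ss_seq[i] != ss_seq[i - 1]] + [n]
--     return [(ss_codes[ss_seq[a]], a, b) for a, b in zip(cuts, cuts[1:])]
-- ===== Notes on version B (the rewrite author's own statement) =====
-- stated objective: alternative
-- what changed: Replaces A's single stateful scan (tracking active run char/start and appending on change) by a two-phase computation: first build the list of run boundary indices [0]+breaks+[n], then emit one tuple per consecutive pair of boundaries.
import Mathlib
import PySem

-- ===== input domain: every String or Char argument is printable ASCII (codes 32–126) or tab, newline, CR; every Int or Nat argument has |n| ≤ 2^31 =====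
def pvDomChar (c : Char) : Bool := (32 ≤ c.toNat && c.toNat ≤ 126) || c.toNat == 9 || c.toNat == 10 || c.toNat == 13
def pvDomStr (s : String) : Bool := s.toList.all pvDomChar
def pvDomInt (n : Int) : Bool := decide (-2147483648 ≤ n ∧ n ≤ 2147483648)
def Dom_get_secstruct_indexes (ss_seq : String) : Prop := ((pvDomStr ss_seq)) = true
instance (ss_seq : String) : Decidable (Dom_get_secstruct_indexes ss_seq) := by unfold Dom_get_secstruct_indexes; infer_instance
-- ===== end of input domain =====

-- B replaces A's stateful scan by a two-phase computation (boundary list, then one tuple per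
-- consecutive boundary pair); same cost, alternative structure.

-- ===== PORT A =====
-- Python dict {"C":0,"H":1,"S":2} (1-char string keys ported as Char); ss_codes[c] raises
-- KeyError outside these keys (such inputs are excluded by Pre_), ported as getD 0.
def pvSSCodes : PySem.Dict Char Int :=
  ((PySem.Dict.empty.insert 'C' 0).insert 'H' 1).insert 'S' 2

def get_secstruct_indexes (ss_seq : String) : List (Int × Int × Int) :=
  let s := ss_seq.toList
  -- ss_seq[0] raises IndexError on "" (excluded by Pre_); the .getD ' ' stands for the raise
  let a0 : Char := (PySem.List.pyGet? s 0).getD ' '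
  let n : Int := (s.length : Int)
  let st := (PySem.List.pyRange 1 n 1).foldl
    (fun (st : List (Int × Int × Int) × Char × Int) i =>
      if (PySem.List.pyGet? s i).getD ' ' ≠ st.2.1 then
        (st.1 ++ [(pvSSCodes.getD st.2.1 0, st.2.2, i)], (PySem.List.pyGet? s i).getD ' ', i)
      else st)
    ([], a0, 0)
  st.1 ++ [(pvSSCodes.getD st.2.1 0, st.2.2, n)]

-- ===== PORT B =====
def get_secstruct_indexes_alt (ss_seq : String) : List (Int × Int × Int) :=
  let s := ss_seq.toList
  let n : Int := (s.length : Int)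
  let cuts : List Int :=
    [0] ++ (PySem.List.pyRange 1 n 1).filter
        (fun i => PySem.List.pyGet? s i ≠ PySem.List.pyGet? s (i - 1)) ++ [n]
  (cuts.zip (PySem.List.slice cuts (some 1) none)).map
    (fun ab => (pvSSCodes.getD ((PySem.List.pyGet? s ab.1).getD ' ') 0, ab.1, ab.2))

-- ===== PRECONDITION & SPEC =====
-- Pre_ = exactly the inputs on which the Python A returns: nonempty (else IndexError on
-- ss_seq[0]) and every character a dict key 'C'/'H'/'S' (else KeyError on ss_codes[...]).
def Pre_get_secstruct_indexes (ss_seq : String) : Prop :=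
  ss_seq.toList ≠ [] ∧ (ss_seq.toList.all fun c => c == 'C' || c == 'H' || c == 'S') = true
instance (ss_seq : String) : Decidable (Pre_get_secstruct_indexes ss_seq) := by
  unfold Pre_get_secstruct_indexes; infer_instance

def pvWitness_get_secstruct_indexes : String := "CCHHSC"

def Spec_get_secstruct_indexes (ss_seq : String) (out : List (Int × Int × Int)) : Prop := out = get_secstruct_indexes_alt ss_seq
instance (ss_seq : String) (out : List (Int × Int × Int)) : Decidable (Spec_get_secstruct_indexes ss_seq out) := by unfold Spec_get_secstruct_indexes; infer_instance

-- ===== CLAIM (what is proved, stated in full; the proofs are below) =====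
def Claim_equal_get_secstruct_indexes : Prop := ∀ (ss_seq : String), Dom_get_secstruct_indexes ss_seq → Pre_get_secstruct_indexes ss_seq → Spec_get_secstruct_indexes ss_seq (get_secstruct_indexes ss_seq)

-- ===== LEMMAS AND PROOFS =====

-- breaks of s strictly below k: indices 1 ≤ i < k where the character changes
def pvBreaks (s : List Char) (k : Nat) : List Nat :=
  (List.range' 1 (k - 1)).filter (fun i => s.getD i ' ' ≠ s.getD (i - 1) ' ')

-- one output tuple per consecutive pair of cut points
def pvEmit (s : List Char) (c : List Nat) : List (Int × Int × Int) :=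
  (c.zip c.tail).map (fun ab => (pvSSCodes.getD (s.getD ab.1 ' ') 0, (ab.1 : Int), (ab.2 : Int)))

theorem pvGet_nat (s : List Char) (k : Nat) :
    (PySem.List.pyGet? s ((k : Nat) : Int)).getD ' ' = s.getD k ' ' := by
  rw [PySem.List.pyGet?_natCast]; rfl

theorem pvGet_zero (s : List Char) :
    (PySem.List.pyGet? s (0 : Int)).getD ' ' = s.getD 0 ' ' := by
  have := pvGet_nat s 0
  simpa using this

theorem pvEmit_cons_cons (s : List Char) (a b : Nat) (l : List Nat) :
    pvEmit s (a :: b :: l) =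
      (pvSSCodes.getD (s.getD a ' ') 0, (a : Int), (b : Int)) :: pvEmit s (b :: l) := by
  simp [pvEmit, List.getD]

theorem pvEmit_append (s : List Char) (c : List Nat) (hc : c ≠ []) (x : Nat) :
    pvEmit s (c ++ [x]) =
      pvEmit s c ++ [(pvSSCodes.getD (s.getD (c.getLastD 0) ' ') 0,
                      ((c.getLastD 0 : Nat) : Int), (x : Int))] := by
  induction c with
  | nil => exact absurd rfl hc
  | cons a c ih =>
    cases c with
    | nil => simp [pvEmit, List.getD]
    | cons b t =>
      have ihh := ih (by simp)
      rw [show (b :: t) ++ [x] = b :: (t ++ [x]) from rfl] at ihh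
      rw [show (a :: b :: t) ++ [x] = a :: b :: (t ++ [x]) from rfl, pvEmit_cons_cons, ihh,
        pvEmit_cons_cons]
      simp

theorem pvBreaks_succ (s : List Char) (k : Nat) (hk : 0 < k) :
    pvBreaks s (k + 1) = pvBreaks s k ++
      (if s.getD k ' ' ≠ s.getD (k - 1) ' ' then [k] else []) := by
  unfold pvBreaks
  rw [Nat.add_sub_cancel]
  obtain ⟨m, rfl⟩ : ∃ m, k = m + 1 := ⟨k - 1, by omega⟩
  rw [List.range'_1_concat, List.filter_append, Nat.add_comm 1 m]
  by_cases h : s[m + 1]?.getD ' ' = s[m]?.getD ' ' <;>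
    simp [h, List.getD]

theorem pvLast_cons_zero (l : List Nat) : (0 :: l).getLast?.getD 0 = l.getLast?.getD 0 := by
  cases l <;> simp

-- A's loop invariant: after processing indices 1..k the accumulated list is the emit of the
-- cut points found so far, the active char is the char at k-1, and it also equals the char
-- at the active start index (the last cut point).
theorem pvFoldA (s : List Char) (k : Nat) :
    ((PySem.List.pyRange 1 (k : Int) 1).foldl
      (fun (st : List (Int × Int × Int) × Char × Int) i =>
        if (PySem.List.pyGet? s i).getD ' ' ≠ st.2.1 then
          (st.1 ++ [(pvSSCodes.getD st.2.1 0, st.2.2, i)], (PySem.List.pyGet? s i).getD ' ', i)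
        else st)
      ([], (PySem.List.pyGet? s 0).getD ' ', 0))
    = (pvEmit s (0 :: pvBreaks s k), s.getD (k - 1) ' ', (((pvBreaks s k).getLastD 0 : Nat) : Int))
    ∧ s.getD (k - 1) ' ' = s.getD ((pvBreaks s k).getLastD 0) ' ' := by
  induction k with
  | zero =>
      refine ⟨?_, by simp [pvBreaks]⟩
      rw [PySem.List.pyRange_one_eq_nil (by norm_num)]
      simp [pvBreaks, pvEmit, pvGet_zero]
  | succ k ih =>
      rcases Nat.eq_zero_or_pos k with hk | hk
      · subst hk
        refine ⟨?_, by simp [pvBreaks]⟩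
        rw [PySem.List.pyRange_one_eq_nil (by norm_num)]
        simp [pvBreaks, pvEmit, pvGet_zero]
      · have hrange : PySem.List.pyRange 1 ((k + 1 : Nat) : Int) 1
            = PySem.List.pyRange 1 (k : Int) 1 ++ [(k : Int)] := by
          have : ((k + 1 : Nat) : Int) = (k : Int) + 1 := by push_cast; ring
          rw [this, PySem.List.pyRange_one_succ_right (by exact_mod_cast hk)]
        have ih2 : s[k - 1]?.getD ' ' = s[(pvBreaks s k).getLast?.getD 0]?.getD ' ' := by
          simpa [List.getD, List.getLastD_eq_getLast?] using ih.2
        rw [hrange, List.foldl_append, ih.1]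
        simp only [List.foldl_cons, List.foldl_nil]
        rw [pvGet_nat, pvBreaks_succ s k hk]
        by_cases hcond : s.getD k ' ' ≠ s.getD (k - 1) ' '
        · rw [if_pos hcond]
          simp only [if_pos hcond]
          refine ⟨?_, ?_⟩
          · rw [show (0 : Nat) :: (pvBreaks s k ++ [k]) = (0 :: pvBreaks s k) ++ [k] from rfl,
              pvEmit_append s _ (by simp) k]
            simp [pvLast_cons_zero, ih2, List.getD, List.getLastD_eq_getLast?]
          · simp
        · rw [if_neg hcond]
          simp only [if_neg hcond]
          rw [ne_eq, not_not] at hcond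
          have hcond2 : s[k]?.getD ' ' = s[k - 1]?.getD ' ' := by simpa [List.getD] using hcond
          refine ⟨?_, ?_⟩
          · simp [List.getD, hcond2]
          · simp [List.getD, List.getLastD_eq_getLast?, hcond2, ih2]

-- B computes the emit of the full cut list [0] ++ breaks ++ [n]
theorem pvAlt_eq (ss_seq : String) :
    get_secstruct_indexes_alt ss_seq =
      pvEmit ss_seq.toList
        ((0 :: pvBreaks ss_seq.toList ss_seq.toList.length) ++ [ss_seq.toList.length]) := by
  simp only [get_secstruct_indexes_alt]
  set s := ss_seq.toList with hs
  set n := s.length with hn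
  have hrange : PySem.List.pyRange 1 (n : Int) 1
      = (List.range' 1 (n - 1)).map (fun i : Nat => (i : Int)) := by
    rw [PySem.List.pyRange_one, List.range'_eq_map_range]
    have h1 : ((n : Int) - 1).toNat = n - 1 := by omega
    rw [h1, List.map_map]
    refine List.map_congr_left fun j _ => ?_
    simp [Function.comp]
  have hfilter : ((List.range' 1 (n - 1)).map (fun i : Nat => (i : Int))).filter
        (fun i => PySem.List.pyGet? s i ≠ PySem.List.pyGet? s (i - 1))
      = (pvBreaks s n).map (fun i : Nat => (i : Int)) := by
    rw [List.filter_map, pvBreaks]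
    congr 1
    refine List.filter_congr fun i hi => ?_
    obtain ⟨hi1, hi2⟩ := List.mem_range'_1.mp hi
    have hin : i < n := by omega
    have hone : ((i : Int) - 1) = ((i - 1 : Nat) : Int) := by omega
    simp only [Function.comp, hone, PySem.List.pyGet?_natCast]
    have h1 : s[i]? = some s[i] := List.getElem?_eq_getElem hin
    have h2 : s[i-1]? = some s[i-1] := List.getElem?_eq_getElem (by omega)
    simp [h1, h2]
  rw [hrange, hfilter, PySem.List.slice_from_one]
  have hcuts : ([(0 : Int)] ++ (pvBreaks s n).map (fun i : Nat => (i : Int)) ++ [(n : Int)])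
      = ((0 :: pvBreaks s n) ++ [n]).map (fun i : Nat => (i : Int)) := by simp
  rw [hcuts, ← List.map_tail, List.zip_map, List.map_map, pvEmit]
  refine List.map_congr_left fun ab _ => ?_
  simp [Function.comp, Prod.map]

theorem pvMain (ss_seq : String) :
    get_secstruct_indexes ss_seq = get_secstruct_indexes_alt ss_seq := by
  obtain ⟨h1, h2⟩ := pvFoldA ss_seq.toList ss_seq.toList.length
  rw [pvAlt_eq]
  simp only [get_secstruct_indexes]
  rw [h1, pvEmit_append _ _ (by simp) _]
  have hl : (0 :: pvBreaks ss_seq.toList ss_seq.toList.length).getLastD 0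
      = (pvBreaks ss_seq.toList ss_seq.toList.length).getLastD 0 := by
    cases pvBreaks ss_seq.toList ss_seq.toList.length <;> simp
  rw [hl, ← h2]

-- ===== VERDICT (by name: the statement is the Claim_ definition above) =====
theorem get_secstruct_indexes_spec : Claim_equal_get_secstruct_indexes := by
  intro ss_seq _ _
  unfold Spec_get_secstruct_indexes
  exact pvMain ss_seq
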